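-- pv_equiv track=rewrite | github.com/ShannonAI/mrc-for-dependency-parsing | parser/utils/decode_utils.py | build_possible_splits
-- ===== SOURCE A (Python) =====
-- from typing import List, Tuple, Dict, Union
-- from collections import defaultdict
--
-- def build_possible_splits(start: int, end: int, spans: List[Tuple[int, int]]) -> List[List[int]]:
--     """
--     find all possible combinations of span indexes that those spans can be merged to [start, end], including end
--     Examples:
--         >>> spans = [(0, 4), (0, 2), (0, 3), (4, 5), (3, 5), (5, 5), (3, 4)]
--         >>> idxs_lst = build_possible_splits(0, 5, spans)
--         >>> [[spans[i] for i in lst] for lst in idxs_lst]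
--         [[(0, 4), (5, 5)], [(0, 2), (3, 5)], [(0, 2), (3, 4), (5, 5)], [(0, 3), (4, 5)]]
--     """
--     if start > end:
--         return [[]]
--     # pos2spans[i] contains all valid span idxs that starts with i
--     pos2spans: Dict[int, List[int]] = defaultdict(list)
--     for span_idx, (i, j) in enumerate(spans):
--         if i < start or j > end:
--             continue
--         pos2spans[i].append(span_idx)
--
--     mem: Dict[int, List[List[int]]] = {}
--
--     def dfs(begin: int) -> List[List[int]]:
--         """do memorable dfs, find all combinations that merged as [begin, end]"""
--         if begin > end:
--             return [[]]
--         if begin in mem: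
--             return mem[begin]
--         answers = []
--         for candidate_span_idx in pos2spans[begin]:
--             candidate_start, candidate_end = spans[candidate_span_idx]
--             for candidate_path in dfs(candidate_end + 1):
--                 answers.append([candidate_span_idx] + candidate_path)
--         mem[begin] = answers
--         return answers
--
--     dfs(start)
--     return mem[start]
-- ===== SOURCE B (Python) =====
-- from typing import List, Tuple, Dict
-- from collections import defaultdict
--
-- def build_possible_splits(start: int, end: int, spans: List[Tuple[int, int]]) -> List[List[int]]:
--     """Bottom-up DP: fill the memo table only at the relevant positions (span starts and
--     `start`), from the highest position down, with a plain loop instead of memoised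
--     recursion."""
--     if start > end:
--         return [[]]
--     pos2spans: Dict[int, List[int]] = defaultdict(list)
--     for span_idx, (i, j) in enumerate(spans):
--         if i < start or j > end:
--             continue
--         pos2spans[i].append(span_idx)
--     mem: Dict[int, List[List[int]]] = {}
--     for begin in sorted(set(pos2spans) | {start}, reverse=True):
--         answers = []
--         for idx in pos2spans.get(begin, []):
--             nxt = spans[idx][1] + 1
--             paths = [[]] if nxt > end else mem.get(nxt, [])
--             for path in paths:
--                 answers.append([idx] + path)
--         mem[begin] = answers
--     return mem[start]
-- ===== Notes on version B (the rewrite author's own statement) =====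
-- stated objective: alternative
-- what changed: Replaces the memoised recursive DFS (inner closure dfs with a mem cache filled on demand) by an explicit bottom-up dynamic-programming loop that fills the table from end down to start, so no recursion and no cache-hit test is needed; result order is preserved.
-- outside the precondition, e.g. on build_possible_splits(0, 2, [(0, 1), (2, 0), (1, 2)]): A returns [[0, 1, 2]], B returns []; on build_possible_splits(0, 1, [(0, -1), (0, 1)]): A raises RecursionError, B returns [[1]]
import Mathlib
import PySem

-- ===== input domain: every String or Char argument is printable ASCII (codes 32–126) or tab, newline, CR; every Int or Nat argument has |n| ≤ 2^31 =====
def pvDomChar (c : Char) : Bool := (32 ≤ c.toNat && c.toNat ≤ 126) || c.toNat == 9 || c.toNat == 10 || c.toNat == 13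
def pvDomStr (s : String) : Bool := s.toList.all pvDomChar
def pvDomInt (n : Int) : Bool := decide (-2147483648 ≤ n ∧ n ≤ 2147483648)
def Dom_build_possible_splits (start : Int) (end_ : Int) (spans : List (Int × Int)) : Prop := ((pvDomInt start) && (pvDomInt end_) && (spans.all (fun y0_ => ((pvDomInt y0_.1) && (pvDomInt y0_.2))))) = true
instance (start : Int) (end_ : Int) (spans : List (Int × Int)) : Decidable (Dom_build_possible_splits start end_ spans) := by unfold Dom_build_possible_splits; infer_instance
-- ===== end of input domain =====

-- B replaces A's memoised recursive DFS by an explicit bottom-up DP loop filling the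
-- table from end_ down to start (objective: alternative; same result, same order).

-- ===== PORT A =====
-- pos2spans: both Pythons build the identical defaultdict(list) index (A's lines are B's lines verbatim)
def bppPos2Spans (start : Int) (end_ : Int) (spans : List (Int × Int)) : PySem.Dict Int (List Int) :=
  (PySem.List.enumerate spans 0).foldl
    (fun d q =>
      if q.2.1 < start ∨ q.2.2 > end_ then d
      else d.modify q.2.1 [] (fun l => l ++ [q.1]))    -- pos2spans[i].append(span_idx)
    PySem.Dict.empty

-- the inner closure `dfs`; fuel = recursion depth bound, never exhausted under Pre_
def bppDfs (end_ : Int) (spans : List (Int × Int)) (p2s : PySem.Dict Int (List Int)) :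
    Nat → Int → PySem.Dict Int (List (List Int)) →
    List (List Int) × PySem.Dict Int (List (List Int))
  | 0, _, mem => ([], mem)
  | fuel+1, begin, mem =>
    if begin > end_ then ([[]], mem)
    else
      match mem.get? begin with
      | some v => (v, mem)
      | none =>
        let st := (p2s.getD begin []).foldl
          (fun (st : List (List Int) × PySem.Dict Int (List (List Int))) idx =>
            -- candidate_start, candidate_end = spans[candidate_span_idx]  (idx from enumerate: always in range)
            let sp := (PySem.List.pyGet? spans idx).getD (0, 0)
            let r := bppDfs end_ spans p2s fuel (sp.2 + 1) st.2
            (r.1.foldl (fun a path => a ++ [idx :: path]) st.1, r.2))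
          ([], mem)
        (st.1, st.2.insert begin st.1)

def build_possible_splits (start : Int) (end_ : Int) (spans : List (Int × Int)) : List (List Int) :=
  if start > end_ then [[]]
  else
    let p2s := bppPos2Spans start end_ spans
    let r := bppDfs end_ spans p2s ((end_ - start + 1).toNat + 1) start PySem.Dict.empty
    (r.2.get? start).getD []    -- mem[start]; present whenever dfs completed (all inputs in Pre_)

-- ===== PORT B =====
-- for begin in sorted(set(pos2spans) | {start}, reverse=True): fill mem[begin]
def bppLoop (end_ : Int) (spans : List (Int × Int)) (p2s : PySem.Dict Int (List Int)) :
    List Int → PySem.Dict Int (List (List Int)) → PySem.Dict Int (List (List Int))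
  | [], mem => mem
  | b :: rest, mem =>
    let answers := (p2s.getD b []).foldl
      (fun a idx =>
        let nxt := ((PySem.List.pyGet? spans idx).getD (0, 0)).2 + 1
        let paths := if nxt > end_ then [[]] else mem.getD nxt []
        a ++ paths.map (fun path => idx :: path))
      []
    bppLoop end_ spans p2s rest (mem.insert b answers)

def build_possible_splits_alt (start : Int) (end_ : Int) (spans : List (Int × Int)) : List (List Int) :=
  if start > end_ then [[]]
  else
    let p2s := bppPos2Spans start end_ spans
    let order := PySem.List.sorted (PySem.Set.union (PySem.Set.ofList p2s.keys) [start])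
      (fun x => x) true
    let mem := bppLoop end_ spans p2s order PySem.Dict.empty
    (mem.get? start).getD []

-- ===== PRECONDITION & SPEC =====
-- Pre_ excludes span lists containing a filtered-in ill-formed span with i > j: on such inputs A's
-- DFS can recurse forever (RecursionError), and where it happens to return, the value reflects the
-- accidental recursion order on empty intervals that no caller would specify.
def Pre_build_possible_splits (start : Int) (end_ : Int) (spans : List (Int × Int)) : Prop :=
  ∀ p ∈ spans, start ≤ p.1 → p.2 ≤ end_ → p.1 ≤ p.2
instance (start : Int) (end_ : Int) (spans : List (Int × Int)) : Decidable (Pre_build_possible_splits start end_ spans) := by unfold Pre_build_possible_splits; infer_instance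

def pvWitness_build_possible_splits : Int × Int × (List (Int × Int)) :=
  (0, 5, [(0, 4), (0, 2), (0, 3), (4, 5), (3, 5), (5, 5), (3, 4)])

def Spec_build_possible_splits (start : Int) (end_ : Int) (spans : List (Int × Int)) (out : List (List Int)) : Prop := out = build_possible_splits_alt start end_ spans
instance (start : Int) (end_ : Int) (spans : List (Int × Int)) (out : List (List Int)) : Decidable (Spec_build_possible_splits start end_ spans out) := by unfold Spec_build_possible_splits; infer_instance

-- ===== CLAIM (what is proved, stated in full; the proofs are below) =====
def Claim_equal_build_possible_splits : Prop := ∀ (start : Int) (end_ : Int) (spans : List (Int × Int)), Dom_build_possible_splits start end_ spans → Pre_build_possible_splits start end_ spans → Spec_build_possible_splits start end_ spans (build_possible_splits start end_ spans)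

-- ===== LEMMAS AND PROOFS =====

-- the common mathematical value both ports compute: fuelled pure recursion …
def bppG (end_ : Int) (spans : List (Int × Int)) (p2s : PySem.Dict Int (List Int)) :
    Nat → Int → List (List Int)
  | 0, _ => []
  | n+1, b =>
    if b > end_ then [[]]
    else (p2s.getD b []).flatMap fun idx =>
      (bppG end_ spans p2s n (((PySem.List.pyGet? spans idx).getD (0, 0)).2 + 1)).map
        (fun path => idx :: path)

-- … with just enough fuel
def bppF (end_ : Int) (spans : List (Int × Int)) (p2s : PySem.Dict Int (List Int)) (b : Int) :
    List (List Int) :=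
  bppG end_ spans p2s ((end_ - b + 1).toNat + 1) b

-- the one fact about pos2spans the proofs use: every indexed span starts past b (Pre_ gives i ≤ j)
def bppH (_end_ : Int) (spans : List (Int × Int)) (p2s : PySem.Dict Int (List Int)) : Prop :=
  ∀ b idx, idx ∈ p2s.getD b [] → b < ((PySem.List.pyGet? spans idx).getD (0, 0)).2 + 1

lemma bppP2S_fold (start end_ : Int) (spans : List (Int × Int)) :
    ∀ (l : List (Int × (Int × Int))) (d : PySem.Dict Int (List Int)),
      (∀ q ∈ l, ¬ (q.2.1 < start ∨ q.2.2 > end_) →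
          q.2.1 < ((PySem.List.pyGet? spans q.1).getD (0, 0)).2 + 1) →
      bppH end_ spans d →
      bppH end_ spans
        (l.foldl (fun d q =>
            if q.2.1 < start ∨ q.2.2 > end_ then d
            else d.modify q.2.1 [] (fun l => l ++ [q.1])) d) := by
  intro l
  induction l with
  | nil => intro d _ hd; simpa using hd
  | cons q l ih =>
    intro d hl hd
    simp only [List.foldl_cons]
    refine ih _ (fun p hp => hl p (List.mem_cons_of_mem _ hp)) ?_
    split_ifs with hc
    · exact hd
    · intro b idx hmem
      rw [PySem.Dict.getD_modify] at hmem
      by_cases hb : b = q.2.1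
      · subst hb
        rw [if_pos rfl] at hmem
        rcases List.mem_append.1 hmem with h | h
        · exact hd _ idx h
        · simp only [List.mem_singleton] at h
          subst h; exact hl q (List.mem_cons_self) hc
      · simp only [if_neg hb] at hmem
        exact hd b idx hmem

lemma bppPos2Spans_H (start end_ : Int) (spans : List (Int × Int))
    (hpre : Pre_build_possible_splits start end_ spans) :
    bppH end_ spans (bppPos2Spans start end_ spans) := by
  refine bppP2S_fold start end_ spans _ _ ?_ ?_
  · intro q hq hc
    rcases (PySem.List.mem_enumerate_iff spans 0 q).1 hq with ⟨k, hk, rfl⟩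
    rw [not_or, not_lt, not_lt] at hc
    simp only [Int.zero_add]
    rw [PySem.List.pyGet?_natCast]
    simp only [List.getElem?_eq_getElem hk, Option.getD_some]
    have := hpre (spans[k]) (List.getElem_mem hk) hc.1 hc.2
    omega
  · intro b idx h
    simp [PySem.Dict.getD_empty] at h

lemma bppG_succ (end_ : Int) (spans : List (Int × Int)) (p2s : PySem.Dict Int (List Int))
    (n : Nat) (b : Int) :
    bppG end_ spans p2s (n + 1) b =
      if b > end_ then [[]]
      else (p2s.getD b []).flatMap fun idx =>
        (bppG end_ spans p2s n (((PySem.List.pyGet? spans idx).getD (0, 0)).2 + 1)).map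
          (fun path => idx :: path) := rfl

lemma bppG_mono (end_ : Int) (spans : List (Int × Int)) (p2s : PySem.Dict Int (List Int))
    (H : bppH end_ spans p2s) :
    ∀ n b, (end_ - b + 1).toNat + 1 ≤ n → bppG end_ spans p2s n b = bppF end_ spans p2s b := by
  intro n
  induction n using Nat.strong_induction_on with
  | _ n ih =>
    intro b hn
    match n, hn with
    | m + 1, hn =>
      by_cases hb : b > end_
      · simp [bppG, bppF, hb]
      · have hbe : (end_ - b + 1).toNat = (end_ - b).toNat + 1 := by omega
        rw [bppF, hbe, bppG_succ, bppG_succ, if_neg hb, if_neg hb,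
          List.flatMap_def, List.flatMap_def]
        refine congrArg _ (List.map_congr_left ?_)
        intro idx hidx
        have hlt := H b idx hidx
        have hnb : (end_ - (((PySem.List.pyGet? spans idx).getD (0, 0)).2 + 1) + 1).toNat + 1
            ≤ (end_ - b).toNat + 1 := by omega
        have h1 := ih m (Nat.lt_succ_self m) (((PySem.List.pyGet? spans idx).getD (0, 0)).2 + 1)
          (by omega)
        have h2 := ih ((end_ - b).toNat + 1) (by omega)
          (((PySem.List.pyGet? spans idx).getD (0, 0)).2 + 1) hnb
        rw [h1, h2]

lemma bppF_gt (end_ : Int) (spans : List (Int × Int)) (p2s : PySem.Dict Int (List Int))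
    (b : Int) (hb : b > end_) : bppF end_ spans p2s b = [[]] := by
  simp [bppF, bppG, hb]

lemma bppF_le (end_ : Int) (spans : List (Int × Int)) (p2s : PySem.Dict Int (List Int))
    (H : bppH end_ spans p2s) (b : Int) (hb : ¬ b > end_) :
    bppF end_ spans p2s b =
      (p2s.getD b []).flatMap (fun idx =>
        (bppF end_ spans p2s (((PySem.List.pyGet? spans idx).getD (0, 0)).2 + 1)).map
          (fun path => idx :: path)) := by
  have hbe : (end_ - b + 1).toNat = (end_ - b).toNat + 1 := by omega
  rw [bppF, hbe, bppG_succ, if_neg hb, List.flatMap_def, List.flatMap_def]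
  refine congrArg _ (List.map_congr_left ?_)
  intro idx hidx
  have hlt := H b idx hidx
  rw [bppG_mono end_ spans p2s H ((end_ - b).toNat + 1) _ (by omega)]

lemma bppDfs_succ (end_ : Int) (spans : List (Int × Int)) (p2s : PySem.Dict Int (List Int))
    (fuel : Nat) (begin mem) :
    bppDfs end_ spans p2s (fuel + 1) begin mem =
      if begin > end_ then ([[]], mem)
      else
        match mem.get? begin with
        | some v => (v, mem)
        | none =>
          let st := (p2s.getD begin []).foldl
            (fun (st : List (List Int) × PySem.Dict Int (List (List Int))) idx =>
              let sp := (PySem.List.pyGet? spans idx).getD (0, 0)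
              let r := bppDfs end_ spans p2s fuel (sp.2 + 1) st.2
              (r.1.foldl (fun a path => a ++ [idx :: path]) st.1, r.2))
            ([], mem)
          (st.1, st.2.insert begin st.1) := rfl

-- the inner for-loop of dfs, given correctness of the recursive calls at fuel f
lemma bppDfs_foldl (end_ : Int) (spans : List (Int × Int)) (p2s : PySem.Dict Int (List Int))
    (f : Nat)
    (IH : ∀ (b : Int) (mem : PySem.Dict Int (List (List Int))),
      (end_ - b + 1).toNat + 1 ≤ f →
      (∀ k v, mem.get? k = some v → v = bppF end_ spans p2s k) →
      (bppDfs end_ spans p2s f b mem).1 = bppF end_ spans p2s b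
      ∧ (∀ k v, (bppDfs end_ spans p2s f b mem).2.get? k = some v → v = bppF end_ spans p2s k)
      ∧ (∀ k v, mem.get? k = some v → (bppDfs end_ spans p2s f b mem).2.get? k = some v)) :
    ∀ (l : List Int),
      (∀ idx ∈ l,
        (end_ - (((PySem.List.pyGet? spans idx).getD (0, 0)).2 + 1) + 1).toNat + 1 ≤ f) →
      ∀ (acc : List (List Int)) (mem : PySem.Dict Int (List (List Int))),
      (∀ k v, mem.get? k = some v → v = bppF end_ spans p2s k) →
      (l.foldl
          (fun (st : List (List Int) × PySem.Dict Int (List (List Int))) idx =>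
            let sp := (PySem.List.pyGet? spans idx).getD (0, 0)
            let r := bppDfs end_ spans p2s f (sp.2 + 1) st.2
            (r.1.foldl (fun a path => a ++ [idx :: path]) st.1, r.2))
          (acc, mem)).1
        = acc ++ l.flatMap (fun idx =>
            (bppF end_ spans p2s (((PySem.List.pyGet? spans idx).getD (0, 0)).2 + 1)).map
              (fun path => idx :: path))
      ∧ (∀ k v, (l.foldl
          (fun (st : List (List Int) × PySem.Dict Int (List (List Int))) idx =>
            let sp := (PySem.List.pyGet? spans idx).getD (0, 0)
            let r := bppDfs end_ spans p2s f (sp.2 + 1) st.2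
            (r.1.foldl (fun a path => a ++ [idx :: path]) st.1, r.2))
          (acc, mem)).2.get? k = some v → v = bppF end_ spans p2s k)
      ∧ (∀ k v, mem.get? k = some v → (l.foldl
          (fun (st : List (List Int) × PySem.Dict Int (List (List Int))) idx =>
            let sp := (PySem.List.pyGet? spans idx).getD (0, 0)
            let r := bppDfs end_ spans p2s f (sp.2 + 1) st.2
            (r.1.foldl (fun a path => a ++ [idx :: path]) st.1, r.2))
          (acc, mem)).2.get? k = some v) := by
  intro l
  induction l with
  | nil => intro _ acc mem hInv; simp; exact hInv
  | cons idx l ihl =>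
    intro hl acc mem hInv
    obtain ⟨hr1, hr2, hr3⟩ := IH (((PySem.List.pyGet? spans idx).getD (0, 0)).2 + 1) mem
      (hl idx (List.mem_cons_self)) hInv
    simp only [List.foldl_cons]
    rw [PySem.List.foldl_append_singleton_eq_map]
    obtain ⟨h1, h2, h3⟩ := ihl (fun i hi => hl i (List.mem_cons_of_mem _ hi))
      (acc ++ (bppDfs end_ spans p2s f (((PySem.List.pyGet? spans idx).getD (0, 0)).2 + 1) mem).1.map
        (fun path => idx :: path))
      (bppDfs end_ spans p2s f (((PySem.List.pyGet? spans idx).getD (0, 0)).2 + 1) mem).2 hr2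
    refine ⟨?_, h2, fun k v hk => h3 k v (hr3 k v hk)⟩
    rw [h1, hr1, List.flatMap_cons, List.append_assoc]

-- A side: the memoised dfs computes bppF and caches only correct values
lemma bppDfs_correct (end_ : Int) (spans : List (Int × Int)) (p2s : PySem.Dict Int (List Int))
    (H : bppH end_ spans p2s) :
    ∀ (fuel : Nat) (b : Int) (mem : PySem.Dict Int (List (List Int))),
      (end_ - b + 1).toNat + 1 ≤ fuel →
      (∀ k v, mem.get? k = some v → v = bppF end_ spans p2s k) →
      (bppDfs end_ spans p2s fuel b mem).1 = bppF end_ spans p2s b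
      ∧ (∀ k v, (bppDfs end_ spans p2s fuel b mem).2.get? k = some v → v = bppF end_ spans p2s k)
      ∧ (∀ k v, mem.get? k = some v → (bppDfs end_ spans p2s fuel b mem).2.get? k = some v)
      ∧ (¬ b > end_ → (bppDfs end_ spans p2s fuel b mem).2.get? b = some (bppF end_ spans p2s b)) := by
  intro fuel
  induction fuel with
  | zero => intro b mem h; omega
  | succ f ihf =>
    intro b mem hfuel hInv
    rw [bppDfs_succ]
    by_cases hb : b > end_
    · rw [if_pos hb]
      exact ⟨(bppF_gt end_ spans p2s b hb).symm, hInv, fun k v hk => hk, fun h => absurd hb h⟩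
    · rw [if_neg hb]
      cases hm : mem.get? b with
      | some v =>
        simp only
        exact ⟨hInv b v hm, hInv, fun k v hk => hk,
          fun _ => by rw [hm, hInv b v hm]⟩
      | none =>
        simp only
        obtain ⟨h1, h2, h3⟩ := bppDfs_foldl end_ spans p2s f
          (fun b' mem' hf' hI' => by
            obtain ⟨c1, c2, c3, _⟩ := ihf b' mem' hf' hI'
            exact ⟨c1, c2, c3⟩)
          (p2s.getD b [])
          (fun i hi => by have := H b i hi; omega)
          [] mem hInv
        have hfb : ((p2s.getD b []).foldl
            (fun (st : List (List Int) × PySem.Dict Int (List (List Int))) idx =>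
              let sp := (PySem.List.pyGet? spans idx).getD (0, 0)
              let r := bppDfs end_ spans p2s f (sp.2 + 1) st.2
              (r.1.foldl (fun a path => a ++ [idx :: path]) st.1, r.2))
            ([], mem)).1 = bppF end_ spans p2s b := by
          rw [h1, List.nil_append, bppF_le end_ spans p2s H b hb]
        refine ⟨hfb, ?_, ?_, ?_⟩
        · intro k v hk
          by_cases hkb : k = b
          · subst hkb; rw [PySem.Dict.get?_insert_self] at hk
            cases hk; simpa using hfb
          · rw [PySem.Dict.get?_insert_of_ne _ _ hkb] at hk
            exact h2 k v hk
        · intro k v hk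
          have hkb : k ≠ b := fun h => by subst h; rw [hm] at hk; cases hk
          rw [PySem.Dict.get?_insert_of_ne _ _ hkb]
          exact h3 k v hk
        · intro _
          rw [PySem.Dict.get?_insert_self, hfb]

-- under Pre_, every key of pos2spans is ≤ end_
lemma bppP2S_keys_fold (start end_ : Int) (spans : List (Int × Int)) :
    ∀ (l : List (Int × (Int × Int))) (d : PySem.Dict Int (List Int)),
      (∀ q ∈ l, ¬ (q.2.1 < start ∨ q.2.2 > end_) → q.2.1 ≤ end_) →
      (∀ k, d.contains k = true → k ≤ end_) →
      ∀ k, (l.foldl (fun d q =>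
          if q.2.1 < start ∨ q.2.2 > end_ then d
          else d.modify q.2.1 [] (fun l => l ++ [q.1])) d).contains k = true → k ≤ end_ := by
  intro l
  induction l with
  | nil => intro d _ hd; simpa using hd
  | cons q l ih =>
    intro d hl hd
    simp only [List.foldl_cons]
    refine ih _ (fun p hp => hl p (List.mem_cons_of_mem _ hp)) ?_
    split_ifs with hc
    · exact hd
    · intro k hk
      rw [PySem.Dict.contains_modify] at hk
      rcases Bool.or_eq_true_iff.1 hk with h | h
      · have : k = q.2.1 := by exact_mod_cast eq_of_beq h
        subst this; exact hl q (List.mem_cons_self) hc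
      · exact hd k h

lemma bppP2S_keys (start end_ : Int) (spans : List (Int × Int))
    (hpre : Pre_build_possible_splits start end_ spans) :
    ∀ k ∈ (bppPos2Spans start end_ spans).keys, k ≤ end_ := by
  intro k hk
  refine bppP2S_keys_fold start end_ spans _ _ ?_ ?_ k
    ((PySem.Dict.contains_iff_mem_keys _ _).2 hk)
  · intro q hq hc
    rcases (PySem.List.mem_enumerate_iff spans 0 q).1 hq with ⟨m, hm, rfl⟩
    rw [not_or, not_lt, not_lt] at hc
    have hc1 : start ≤ spans[m].1 := by simpa using hc.1
    have hc2 : spans[m].2 ≤ end_ := by simpa using hc.2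
    have h2 := hpre (spans[m]) (List.getElem_mem hm) hc1 hc2
    simpa using le_trans h2 hc2
  · intro k hk; rw [PySem.Dict.contains_empty] at hk; cases hk

-- B side: the loop over descending relevant positions fills mem with bppF values
lemma bppLoop_correct (end_ : Int) (spans : List (Int × Int)) (p2s : PySem.Dict Int (List Int))
    (H : bppH end_ spans p2s) :
    ∀ (L : List Int) (mem : PySem.Dict Int (List (List Int))),
      (∀ b ∈ L, b ≤ end_) →
      L.Pairwise (· > ·) →
      (∀ k v, mem.get? k = some v → v = bppF end_ spans p2s k) →
      (∀ k, p2s.contains k = true → k ∈ L ∨ (mem.get? k).isSome) →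
      (∀ k v, mem.get? k = some v → (bppLoop end_ spans p2s L mem).get? k = some v)
      ∧ (∀ k v, (bppLoop end_ spans p2s L mem).get? k = some v → v = bppF end_ spans p2s k)
      ∧ (∀ b ∈ L, (bppLoop end_ spans p2s L mem).get? b = some (bppF end_ spans p2s b)) := by
  intro L
  induction L with
  | nil =>
    intro mem _ _ h1 _
    exact ⟨fun k v hk => hk, h1, fun b hb => absurd hb (List.not_mem_nil)⟩
  | cons b rest ihL =>
    intro mem hle hpw h1 hcov
    have hble : b ≤ end_ := hle b (List.mem_cons_self)
    have hrest_lt : ∀ x ∈ rest, x < b := fun x hx => (List.pairwise_cons.1 hpw).1 x hx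
    have hans : ((p2s.getD b []).foldl
        (fun a idx =>
          let nxt := ((PySem.List.pyGet? spans idx).getD (0, 0)).2 + 1
          let paths := if nxt > end_ then [[]] else mem.getD nxt []
          a ++ paths.map (fun path => idx :: path))
        []) = bppF end_ spans p2s b := by
      rw [PySem.List.foldl_append_eq_flatMap, List.nil_append,
        bppF_le end_ spans p2s H b (by omega)]
      rw [List.flatMap_def, List.flatMap_def]
      refine congrArg _ (List.map_congr_left ?_)
      intro idx hidx
      have hlt := H b idx hidx
      have hpaths : (if ((PySem.List.pyGet? spans idx).getD (0, 0)).2 + 1 > end_ then [[]]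
            else mem.getD (((PySem.List.pyGet? spans idx).getD (0, 0)).2 + 1) [])
          = bppF end_ spans p2s (((PySem.List.pyGet? spans idx).getD (0, 0)).2 + 1) := by
        by_cases hnn : ((PySem.List.pyGet? spans idx).getD (0, 0)).2 + 1 > end_
        · rw [if_pos hnn, bppF_gt end_ spans p2s _ hnn]
        · rw [if_neg hnn]
          cases hg : mem.get? (((PySem.List.pyGet? spans idx).getD (0, 0)).2 + 1) with
          | some v =>
            rw [PySem.Dict.getD_eq_get?_getD, hg, Option.getD_some]
            exact h1 _ v hg
          | none =>
            rw [PySem.Dict.getD_eq_get?_getD, hg, Option.getD_none]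
            have hnc : p2s.contains (((PySem.List.pyGet? spans idx).getD (0, 0)).2 + 1) = false := by
              by_contra hcc
              rcases hcov _ (by simpa using hcc) with hin | hs
              · rcases List.mem_cons.1 hin with h | h
                · omega
                · have := hrest_lt _ h; omega
              · rw [hg] at hs; cases hs
            rw [bppF_le end_ spans p2s H _ hnn,
              PySem.Dict.getD_of_not_contains _ _ hnc, List.flatMap_nil]
      rw [hpaths]
    show _ ∧ _ ∧ _
    simp only [bppLoop, hans]
    obtain ⟨e1, e2, e3⟩ := ihL (mem.insert b (bppF end_ spans p2s b))
      (fun x hx => hle x (List.mem_cons_of_mem _ hx))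
      (List.pairwise_cons.1 hpw).2
      (fun k v hk => by
        by_cases hkb : k = b
        · subst hkb; rw [PySem.Dict.get?_insert_self] at hk; cases hk; rfl
        · rw [PySem.Dict.get?_insert_of_ne _ _ hkb] at hk; exact h1 k v hk)
      (fun k hk => by
        by_cases hkb : k = b
        · subst hkb; right; rw [PySem.Dict.get?_insert_self]; rfl
        · rcases hcov k hk with hin | hs
          · rcases List.mem_cons.1 hin with h | h
            · exact absurd h hkb
            · exact Or.inl h
          · right; rw [PySem.Dict.get?_insert_of_ne _ _ hkb]; exact hs)
    refine ⟨?_, e2, ?_⟩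
    · intro k v hk
      by_cases hkb : k = b
      · subst hkb
        have hv : v = bppF end_ spans p2s k := h1 k v hk
        refine e1 k v ?_
        rw [PySem.Dict.get?_insert_self, hv]
      · exact e1 k v (by rw [PySem.Dict.get?_insert_of_ne _ _ hkb]; exact hk)
    · intro b' hb'
      rcases List.mem_cons.1 hb' with h | h
      · subst h
        exact e1 b' _ (PySem.Dict.get?_insert_self _ _ _)
      · exact e3 b' h

-- ===== VERDICT (by name: the statement is the Claim_ definition above) =====
theorem build_possible_splits_spec : Claim_equal_build_possible_splits := by
  intro start end_ spans _ hpre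
  unfold Spec_build_possible_splits
  by_cases hse : start > end_
  · unfold build_possible_splits build_possible_splits_alt
    rw [if_pos hse, if_pos hse]
  · have H := bppPos2Spans_H start end_ spans hpre
    have hEmpty : ∀ k v, (PySem.Dict.empty : PySem.Dict Int (List (List Int))).get? k = some v →
        v = bppF end_ spans (bppPos2Spans start end_ spans) k := by
      intro k v hk; rw [PySem.Dict.get?_empty] at hk; cases hk
    have hA : build_possible_splits start end_ spans
        = bppF end_ spans (bppPos2Spans start end_ spans) start := by
      simp only [build_possible_splits]
      rw [if_neg hse]
      obtain ⟨_, _, _, h4⟩ := bppDfs_correct end_ spans (bppPos2Spans start end_ spans) H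
        ((end_ - start + 1).toNat + 1) start PySem.Dict.empty (Nat.le_refl _) hEmpty
      rw [h4 hse]
      rfl
    have hB : build_possible_splits_alt start end_ spans
        = bppF end_ spans (bppPos2Spans start end_ spans) start := by
      simp only [build_possible_splits_alt]
      rw [if_neg hse]
      set p2s := bppPos2Spans start end_ spans with hp2s
      set L := PySem.List.sorted (PySem.Set.union (PySem.Set.ofList p2s.keys) [start])
        (fun x => x) true with hL
      have hmemL : ∀ x, x ∈ L ↔ (x ∈ p2s.keys ∨ x = start) := by
        intro x
        rw [hL, PySem.List.mem_sorted]
        show x ∈ PySem.Set.add (PySem.Set.ofList p2s.keys) start ↔ _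
        rw [PySem.Set.mem_add, PySem.Set.mem_ofList]
      have hnd : L.Nodup := by
        refine (PySem.List.sorted_perm _ _ _).nodup_iff.2 ?_
        show (PySem.Set.add (PySem.Set.ofList p2s.keys) start).Nodup
        exact PySem.Set.nodup_add _ _ (PySem.Set.nodup_ofList _)
      have hpw : L.Pairwise (· > ·) := by
        have h1 := PySem.List.sorted_pairwise_rev
          (PySem.Set.union (PySem.Set.ofList p2s.keys) [start]) (fun x : Int => x)
        rw [← hL] at h1
        exact (h1.and hnd).imp (fun {a b} h => lt_of_le_of_ne h.1 (fun he => h.2 he.symm))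
      obtain ⟨_, _, e3⟩ := bppLoop_correct end_ spans p2s H L PySem.Dict.empty
        (fun x hx => by
          rcases (hmemL x).1 hx with h | h
          · exact bppP2S_keys start end_ spans hpre x h
          · omega)
        hpw hEmpty
        (fun k hk => Or.inl ((hmemL k).2 (Or.inl ((PySem.Dict.contains_iff_mem_keys _ _).1 hk))))
      rw [e3 start ((hmemL start).2 (Or.inr rfl))]
      rfl
    rw [hA, hB]
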